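-- pv_equiv track=rewrite | github.com/tqpsxxn/CodeHunter | task2/prepare_bert.py | get_try_index_for_ast
-- ===== SOURCE A (Python) =====
-- def get_try_index_for_ast(tokens):
--     start = -1
--     stack = []
--     for i, token in enumerate(tokens):
--         if token == 'TRY' and not stack:
--             start = i
--         elif token in ["'", '"']:
--             if stack:
--                 if stack[-1] == token:
--                     stack.pop()
--             else:
--                 stack.append(token)
--     return start
-- ===== SOURCE B (Python) =====
-- def get_try_index_for_ast(tokens):
--     # pass 1: outside[i] = quote state is "outside quotes" just before token i
--     outside = []
--     q = None
--     for t in tokens: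
--         outside.append(q is None)
--         if t == "'" or t == '"':
--             if q is None:
--                 q = t
--             elif q == t:
--                 q = None
--     # pass 2: first matching index from the right
--     for i in range(len(tokens) - 1, -1, -1):
--         if tokens[i] == 'TRY' and outside[i]:
--             return i
--     return -1
-- ===== Notes on version B (the rewrite author's own statement) =====
-- stated objective: alternative
-- what changed: Replaces A's single accumulate-last-TRY pass (with an explicit quote stack) by a two-phase decomposition: a forward pass building a boolean outside-quotes mask driven by a scalar quote state, then a reverse index scan returning the first TRY whose mask bit is set.
import Mathlib
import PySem

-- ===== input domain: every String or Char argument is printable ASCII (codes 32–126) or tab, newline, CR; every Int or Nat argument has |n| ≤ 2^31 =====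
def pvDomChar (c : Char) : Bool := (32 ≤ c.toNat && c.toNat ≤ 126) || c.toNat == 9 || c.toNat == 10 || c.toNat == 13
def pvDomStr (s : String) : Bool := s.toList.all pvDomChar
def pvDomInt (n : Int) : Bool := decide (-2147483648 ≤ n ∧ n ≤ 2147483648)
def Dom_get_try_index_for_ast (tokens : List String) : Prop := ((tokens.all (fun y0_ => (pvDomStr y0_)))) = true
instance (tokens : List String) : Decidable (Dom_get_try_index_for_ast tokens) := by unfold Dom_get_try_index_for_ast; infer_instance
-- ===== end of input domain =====

-- B replaces A's single accumulate-last-TRY pass by a forward outside-quotes mask plus a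
-- reverse scan: a different decomposition of the same O(n) task (objective: alternative).

-- ===== PORT A =====
-- the for-loop over enumerate(tokens) with state (start, stack), as structural recursion
def goA : List String → Int → Int → List String → Int
  | [], _, start, _ => start
  | t :: ts, i, start, stack =>
    if t == "TRY" && stack.isEmpty then goA ts (i+1) i stack
    else if t == "'" || t == "\"" then
      (if stack.isEmpty then goA ts (i+1) start (stack ++ [t])
       else if stack.getLast? == some t then goA ts (i+1) start stack.dropLast
       else goA ts (i+1) start stack)
    else goA ts (i+1) start stack

def get_try_index_for_ast (tokens : List String) : Int :=
  goA tokens 0 (-1) []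

-- ===== PORT B =====
-- scalar quote-state update (q is None / q == t branches of Source B)
def stepQ (q : Option String) (t : String) : Option String :=
  if t == "'" || t == "\"" then
    match q with
    | none => some t
    | some c => if c == t then none else some c
  else q

-- pass 1 of Source B: outside[i] = (q is None) just before token i
def buildMask : List String → Option String → List Bool
  | [], _ => []
  | t :: ts, q => q.isNone :: buildMask ts (stepQ q t)

-- pass 2 of Source B: for i in range(len-1, -1, -1); getD is exact since i is always in range
def revScan (tokens : List String) (outside : List Bool) : Nat → Int
  | 0 => -1
  | n+1 =>
    if tokens.getD n "" == "TRY" && outside.getD n false then ((n : Nat) : Int)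
    else revScan tokens outside n

def get_try_index_for_ast_alt (tokens : List String) : Int :=
  revScan tokens (buildMask tokens none) tokens.length

-- ===== PRECONDITION & SPEC =====
def Spec_get_try_index_for_ast (tokens : List String) (out : Int) : Prop := out = get_try_index_for_ast_alt tokens
instance (tokens : List String) (out : Int) : Decidable (Spec_get_try_index_for_ast tokens out) := by unfold Spec_get_try_index_for_ast; infer_instance

-- ===== CLAIM (what is proved, stated in full; the proofs are below) =====
def Claim_equal_get_try_index_for_ast : Prop := ∀ (tokens : List String), Dom_get_try_index_for_ast tokens → Spec_get_try_index_for_ast tokens (get_try_index_for_ast tokens)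

-- ===== LEMMAS AND PROOFS =====

-- reference value: relative index of the last TRY outside quotes, -1 if none
def refL : List String → Option String → Int
  | [], _ => -1
  | t :: ts, q =>
    let r := refL ts (stepQ q t)
    if r = -1 then (if t == "TRY" && q.isNone then 0 else -1) else r + 1

def olist : Option String → List String
  | none => []
  | some c => [c]

theorem refL_ge (ts : List String) (q : Option String) : -1 ≤ refL ts q := by
  induction ts generalizing q with
  | nil => simp [refL]
  | cons t ts ih =>
    simp only [refL]
    have := ih (stepQ q t)
    split_ifs <;> omega

theorem goA_eq_refL (ts : List String) (q : Option String) (i s : Int) :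
    goA ts i s (olist q) = if refL ts q = -1 then s else i + refL ts q := by
  induction ts generalizing q i s with
  | nil => simp [goA, refL]
  | cons t ts ih =>
    have hge := refL_ge ts (stepQ q t)
    by_cases hT : t = "TRY" ∧ q = none
    · obtain ⟨hT1, hT2⟩ := hT
      subst hT1 hT2
      have hs : stepQ none "TRY" = none := by decide
      have ihh := ih none (i+1) i
      simp only [olist] at ihh
      simp only [goA, olist, refL, hs]
      simp only [ihh]
      have hge' := refL_ge ts none
      split_ifs <;> simp_all <;> omega
    · -- A does not update start; both sides step the quote state with stepQ
      have hbranch : goA (t :: ts) i s (olist q) = goA ts (i+1) s (olist (stepQ q t)) := by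
        cases q with
        | none =>
          have ht : ¬ t = "TRY" := fun h => hT ⟨h, rfl⟩
          simp only [goA, olist, List.isEmpty_nil, stepQ]
          by_cases hq : t = "'" ∨ t = "\""
          · rcases hq with h | h <;> subst h <;> simp [olist]
          · push_neg at hq
            simp [ht, hq.1, hq.2, olist]
        | some c =>
          by_cases hq : t = "'" ∨ t = "\""
          · rcases hq with h | h
            · subst h
              by_cases hc : c = "'"
              · subst hc; simp [goA, olist, stepQ, List.getLast?]
              · simp [goA, olist, stepQ, List.getLast?, hc]
            · subst h
              by_cases hc : c = "\""
              · subst hc; simp [goA, olist, stepQ, List.getLast?]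
              · simp [goA, olist, stepQ, List.getLast?, hc]
          · push_neg at hq
            simp [goA, olist, stepQ, hq.1, hq.2]
      rw [hbranch, ih (stepQ q t) (i+1) s]
      have hcond : ¬ (t == "TRY" && q.isNone) = true := by
        intro h
        simp only [Bool.and_eq_true, beq_iff_eq, Option.isNone_iff_eq_none] at h
        exact hT h
      simp only [refL]
      rw [if_neg hcond]
      split_ifs <;> simp_all <;> omega

theorem revScan_shift (t : String) (ts : List String) (b : Bool) (m : List Bool) (n : Nat) :
    revScan (t :: ts) (b :: m) (n + 1) =
      if revScan ts m n = -1 then (if t == "TRY" && b then 0 else -1)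
      else revScan ts m n + 1 := by
  have step : ∀ (tk : List String) (ms : List Bool) (k : Nat),
      revScan tk ms (k+1) =
        if tk.getD k "" == "TRY" && ms.getD k false then ((k : Nat) : Int)
        else revScan tk ms k := fun _ _ _ => rfl
  induction n with
  | zero => simp [revScan, step]
  | succ n ih =>
    rw [step (t :: ts) (b :: m) (n+1), ih, step ts m n]
    have h1 : (t :: ts).getD (n+1) "" = ts.getD n "" := by simp
    have h2 : (b :: m).getD (n+1) false = m.getD n false := by simp
    rw [h1, h2]
    by_cases hp : (ts.getD n "" == "TRY" && m.getD n false) = true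
    · rw [if_pos hp, if_pos hp]
      have : ¬ ((n : Int) = -1) := by omega
      rw [if_neg this]
      push_cast; ring
    · rw [if_neg hp, if_neg hp]

theorem alt_eq_refL (ts : List String) (q : Option String) :
    revScan ts (buildMask ts q) ts.length = refL ts q := by
  induction ts generalizing q with
  | nil => simp [revScan, refL, buildMask]
  | cons t ts ih =>
    simp only [buildMask, List.length_cons]
    rw [revScan_shift, ih (stepQ q t)]
    simp only [refL]

-- ===== VERDICT (by name: the statement is the Claim_ definition above) =====
theorem get_try_index_for_ast_spec : Claim_equal_get_try_index_for_ast := by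
  intro tokens _
  unfold Spec_get_try_index_for_ast get_try_index_for_ast get_try_index_for_ast_alt
  have hA := goA_eq_refL tokens none 0 (-1)
  simp only [olist] at hA
  rw [hA, alt_eq_refL]
  split_ifs with h
  · omega
  · omega
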